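-- pv_equiv track=rewrite | github.com/isaacponsford/test | tools.py | getPlaneActual
-- ===== SOURCE A (Python) =====
-- def moveDown(passengers, seats, downgradeAmount, index, upDowns):
--     inputVal = 0
--
--     if downgradeAmount == 0:
--         pass
--     else:
--         currentExcess = seats[index][1]  - passengers[index][1]
--         if currentExcess > 0 :
--
--             if currentExcess > downgradeAmount:
--                 inputVal = downgradeAmount
--             else:
--                 inputVal = currentExcess
--
--             downgradeAmount = downgradeAmount - inputVal
--             passengers[index][1] = passengers[index][1] + inputVal
--
--         if index != 1:
--             upDowns[index-1][1] = inputVal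
--
--         moveDown(passengers, seats, downgradeAmount, index+1, upDowns)
--
-- def moveUp(passengers, actual, index, upgradeAmount, seats, upDowns):
--
--     if index < 0:
--         if upgradeAmount == 0:
--             pass
--         else:
--             moveDown(actual, seats, upgradeAmount, 0, upDowns)
--     else:
--         if passengers[index][1] + upgradeAmount < seats[index][1]:
--             actual[index][1] = passengers[index][1] + upgradeAmount
--             upgradeAmount = 0
--         else:
--             actual[index][1] = seats[index][1]
--             upgradeAmount = upgradeAmount +  (passengers[index][1] - actual[index][1])
--
--         if index != 0:
--             upDowns[index-1][0] = upgradeAmount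
--         else:
--             upDowns[0][1] = upgradeAmount
--
--         moveUp(passengers, actual, index-1, upgradeAmount, seats, upDowns)
--
-- def getPlaneActual(seats, passengers):
--     actual = []
--     upDowns = []
--
--     length = len(seats)
--
--     for i in range(9):
--         actual.append([i+1,0])
--
--     for i in range(9):
--         upDowns.append([0,0])
--
--     passengersTemp = listExtend(passengers, 9)
--     seatsTemp = listExtend(seats, 9)
--
--     moveUp(passengersTemp, actual, 8, 0, seatsTemp, upDowns)
--
--     for x in upDowns:
--         currentUp, currentDown = x
--         if currentUp != 0 and currentDown != 0:
--             if currentUp > currentDown: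
--                 x[0] = currentUp - currentDown
--                 x[1] = 0
--             elif currentUp < currentDown:
--                 x[1] = currentDown - currentUp
--                 x[0] = 0
--             else:
--                 x[0] = 0
--                 x[1] = 0
--
--     actual = actual[0:length]
--     return[actual, upDowns]
--
-- def listExtend(array, desiredLength):
--
--     out = []
--
--     for i in range(desiredLength):
--         try:
--             out.append(array[i])
--         except:
--             out.append((i+1, 0))
--
--     return out
-- ===== SOURCE B (Python) =====
-- def getPlaneActual(seats, passengers):
--     # Same result as the recursive original, computed with flat per-class count
--     # lists and explicit loops instead of the moveUp/moveDown recursion.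
--     length = len(seats)
--     sc = [seats[i][1] if i < len(seats) else 0 for i in range(9)]
--     pc = [passengers[i][1] if i < len(passengers) else 0 for i in range(9)]
--     actual = [[i + 1, 0] for i in range(9)]
--     upDowns = [[0, 0] for i in range(9)]
--     up = 0
--     for index in range(8, -1, -1):
--         if pc[index] + up < sc[index]:
--             actual[index][1] = pc[index] + up
--             up = 0
--         else:
--             actual[index][1] = sc[index]
--             up = up + (pc[index] - sc[index])
--         if index != 0:
--             upDowns[index - 1][0] = up
--         else:
--             upDowns[0][1] = up
--     if up != 0:
--         down = up
--         index = 0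
--         while down != 0:
--             inputVal = 0
--             excess = sc[index] - actual[index][1]
--             if excess > 0:
--                 inputVal = down if excess > down else excess
--                 down = down - inputVal
--                 actual[index][1] = actual[index][1] + inputVal
--             if index != 1:
--                 upDowns[index - 1][1] = inputVal
--             index = index + 1
--     upDowns = [x if x[0] == 0 or x[1] == 0 else [max(x[0] - x[1], 0), max(x[1] - x[0], 0)]
--                for x in upDowns]
--     return [actual[:length], upDowns]
-- ===== Notes on version B (the rewrite author's own statement) =====
-- stated objective: simpler
-- what changed: The mutually recursive moveUp/moveDown helpers and the try/except listExtend are replaced by flat per-class count lists built with comprehensions, an explicit for-loop (8 down to 0) for the upgrade pass, a while-loop for the downgrade pass, and a comprehension with max() replacing the three-way netting branches.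
import Mathlib
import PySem

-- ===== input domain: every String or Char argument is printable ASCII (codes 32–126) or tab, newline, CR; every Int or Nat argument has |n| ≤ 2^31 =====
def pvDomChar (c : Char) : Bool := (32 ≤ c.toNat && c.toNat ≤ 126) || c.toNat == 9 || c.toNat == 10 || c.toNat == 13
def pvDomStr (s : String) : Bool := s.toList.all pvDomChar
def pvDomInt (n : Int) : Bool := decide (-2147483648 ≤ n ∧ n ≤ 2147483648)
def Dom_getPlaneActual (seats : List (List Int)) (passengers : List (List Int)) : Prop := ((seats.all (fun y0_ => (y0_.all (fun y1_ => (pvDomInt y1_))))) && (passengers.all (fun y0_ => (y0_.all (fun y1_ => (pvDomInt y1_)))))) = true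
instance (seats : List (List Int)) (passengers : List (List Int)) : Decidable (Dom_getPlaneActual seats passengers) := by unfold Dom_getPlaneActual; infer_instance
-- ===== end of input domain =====

-- B re-implements A with flat count lists and explicit loops in place of the moveUp/moveDown
-- recursion; equivalence is about the RETURN value (neither program mutates its arguments).

-- shared two-level accessors: xs[i][1], xs[i][1] = v, xs[i][0] = v with Python index semantics
-- (the defaults of pyGetD/pySetD are only reached where the Python raises, i.e. outside Pre_)
def pvGet1 (xs : List (List Int)) (i : Int) : Int :=
  PySem.List.pyGetD (PySem.List.pyGetD xs i []) 1 0

def pvSet1 (xs : List (List Int)) (i : Int) (v : Int) : List (List Int) :=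
  PySem.List.pySetD xs i (PySem.List.pySetD (PySem.List.pyGetD xs i []) 1 v)

def pvSet0 (xs : List (List Int)) (i : Int) (v : Int) : List (List Int) :=
  PySem.List.pySetD xs i (PySem.List.pySetD (PySem.List.pyGetD xs i []) 0 v)

-- ===== PORT A =====
-- listExtend: the Python appends the TUPLE (i+1, 0) for a missing row (bare except catches the
-- IndexError of array[i]); ported as the 2-list [i+1, 0] since those rows are only ever read at [1]
def listExtendA (array : List (List Int)) (desiredLength : Int) : List (List Int) :=
  (PySem.List.pyRange 0 desiredLength 1).foldl
    (fun out i =>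
      out ++ [match PySem.List.pyGet? array i with
              | some row => row
              | none => [i + 1, 0]]) []

-- moveDown: recursion with fuel (the Python recursion reaches index ≤ 9; at index 9 with a
-- nonzero amount it raises IndexError on seats[9] — those inputs are outside Pre_, so the
-- fuel-0 result and the out-of-range read defaults are never relevant under Pre_)
def moveDownA (fuel : Nat) (passengers : List (List Int)) (seats : List (List Int))
    (downgradeAmount : Int) (index : Int) (upDowns : List (List Int)) :
    List (List Int) × List (List Int) :=
  match fuel with
  | 0 => (passengers, upDowns)
  | f + 1 =>
    if downgradeAmount = 0 then (passengers, upDowns)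
    else
      let currentExcess := pvGet1 seats index - pvGet1 passengers index
      let inputVal := if currentExcess > 0 then
          (if currentExcess > downgradeAmount then downgradeAmount else currentExcess) else 0
      let downgradeAmount' := if currentExcess > 0 then downgradeAmount - inputVal else downgradeAmount
      let passengers' := if currentExcess > 0 then
          pvSet1 passengers index (pvGet1 passengers index + inputVal) else passengers
      let upDowns' := if index ≠ 1 then pvSet1 upDowns (index - 1) inputVal else upDowns
      moveDownA f passengers' seats downgradeAmount' (index + 1) upDowns'

-- moveUp: recursion from index 8 down to -1 (ten calls, hence fuel 10 at the call site);
-- the read-back of actual[index][1] in the upgradeAmount update is the value just assigned to it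
def moveUpA (fuel : Nat) (passengers : List (List Int)) (actual : List (List Int))
    (index : Int) (upgradeAmount : Int) (seats : List (List Int)) (upDowns : List (List Int)) :
    List (List Int) × List (List Int) :=
  match fuel with
  | 0 => (actual, upDowns)
  | f + 1 =>
    if index < 0 then
      if upgradeAmount = 0 then (actual, upDowns)
      else moveDownA 10 actual seats upgradeAmount 0 upDowns
    else
      let cond := pvGet1 passengers index + upgradeAmount < pvGet1 seats index
      let actual' := if cond then pvSet1 actual index (pvGet1 passengers index + upgradeAmount)
                     else pvSet1 actual index (pvGet1 seats index)
      let upgradeAmount' := if cond then 0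
                            else upgradeAmount + (pvGet1 passengers index - pvGet1 seats index)
      let upDowns' := if index ≠ 0 then pvSet0 upDowns (index - 1) upgradeAmount'
                      else pvSet1 upDowns 0 upgradeAmount'
      moveUpA f passengers actual' (index - 1) upgradeAmount' seats upDowns'

-- the body of A's 'for x in upDowns' netting pass (in-place row mutation, ported as a map)
def netA (x : List Int) : List Int :=
  let currentUp := PySem.List.pyGetD x 0 0
  let currentDown := PySem.List.pyGetD x 1 0
  if currentUp ≠ 0 ∧ currentDown ≠ 0 then
    if currentUp > currentDown then
      PySem.List.pySetD (PySem.List.pySetD x 0 (currentUp - currentDown)) 1 0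
    else if currentUp < currentDown then
      PySem.List.pySetD (PySem.List.pySetD x 1 (currentDown - currentUp)) 0 0
    else
      PySem.List.pySetD (PySem.List.pySetD x 0 0) 1 0
  else x

def getPlaneActual (seats : List (List Int)) (passengers : List (List Int)) :
    List (List (List Int)) :=
  let actual := (PySem.List.pyRange 0 9 1).foldl (fun a i => a ++ [[i + 1, 0]]) []
  let upDowns := (PySem.List.pyRange 0 9 1).foldl (fun a _ => a ++ [[0, 0]]) ([] : List (List Int))
  let length := (seats.length : Int)
  let passengersTemp := listExtendA passengers 9
  let seatsTemp := listExtendA seats 9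
  let r := moveUpA 10 passengersTemp actual 8 0 seatsTemp upDowns
  [PySem.List.slice r.1 (some 0) (some length), r.2.map netA]

-- ===== PORT B =====
-- [seats[i][1] if i < len(seats) else 0 for i in range(9)]
def bCounts (xs : List (List Int)) : List Int :=
  (PySem.List.pyRange 0 9 1).map (fun i => if i < (xs.length : Int) then pvGet1 xs i else 0)

-- one iteration of B's 'for index in range(8, -1, -1)' upgrade loop
def altUpStep (pc sc : List Int) (st : List (List Int) × List (List Int) × Int) (index : Int) :
    List (List Int) × List (List Int) × Int :=
  match st with
  | (actual, upDowns, up) =>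
    let (actual, up) :=
      if PySem.List.pyGetD pc index 0 + up < PySem.List.pyGetD sc index 0 then
        (pvSet1 actual index (PySem.List.pyGetD pc index 0 + up), 0)
      else
        (pvSet1 actual index (PySem.List.pyGetD sc index 0),
         up + (PySem.List.pyGetD pc index 0 - PySem.List.pyGetD sc index 0))
    let upDowns := if index ≠ 0 then pvSet0 upDowns (index - 1) up else pvSet1 upDowns 0 up
    (actual, upDowns, up)

-- B's 'while down != 0' downgrade loop (fuel 10: under Pre_ down reaches 0 by index 9;
-- outside Pre_ the Python while-loop raises IndexError on sc[9])
def altDownLoop (fuel : Nat) (sc : List Int) (actual upDowns : List (List Int))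
    (down index : Int) : List (List Int) × List (List Int) :=
  match fuel with
  | 0 => (actual, upDowns)
  | f + 1 =>
    if down = 0 then (actual, upDowns)
    else
      let excess := PySem.List.pyGetD sc index 0 - pvGet1 actual index
      let inputVal := if excess > 0 then (if excess > down then down else excess) else 0
      let down' := if excess > 0 then down - inputVal else down
      let actual' := if excess > 0 then pvSet1 actual index (pvGet1 actual index + inputVal)
                     else actual
      let upDowns' := if index ≠ 1 then pvSet1 upDowns (index - 1) inputVal else upDowns
      altDownLoop f sc actual' upDowns' down' (index + 1)

-- B's 'if up != 0: <downgrade loop>'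
def altFinish (sc : List Int) (st : List (List Int) × List (List Int) × Int) :
    List (List Int) × List (List Int) :=
  if st.2.2 ≠ 0 then altDownLoop 10 sc st.1 st.2.1 st.2.2 0 else (st.1, st.2.1)

-- the body of B's netting comprehension
def netB (x : List Int) : List Int :=
  if PySem.List.pyGetD x 0 0 = 0 ∨ PySem.List.pyGetD x 1 0 = 0 then x
  else [max (PySem.List.pyGetD x 0 0 - PySem.List.pyGetD x 1 0) 0,
        max (PySem.List.pyGetD x 1 0 - PySem.List.pyGetD x 0 0) 0]

def getPlaneActual_alt (seats : List (List Int)) (passengers : List (List Int)) :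
    List (List (List Int)) :=
  let length := seats.length
  let sc := bCounts seats
  let pc := bCounts passengers
  let actual := (PySem.List.pyRange 0 9 1).map (fun i => [i + 1, 0])
  let upDowns := (PySem.List.pyRange 0 9 1).map (fun _ => ([0, 0] : List Int))
  let r := altFinish sc ((PySem.List.pyRange 8 (-1) (-1)).foldl (altUpStep pc sc) (actual, upDowns, 0))
  [r.1.take length, r.2.map netB]

-- ===== PRECONDITION & SPEC =====
-- Pre_ = exactly the inputs on which A returns: every row among the first nine of seats and of
-- passengers has at least two entries (else seats[i][1]/passengers[i][1] raises IndexError), and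
-- the total booked count does not exceed the total seat count over the nine classes (else the
-- unbounded moveDown recursion runs past index 8 and raises IndexError on seats[9]).
def Pre_getPlaneActual (seats : List (List Int)) (passengers : List (List Int)) : Prop :=
  (∀ row ∈ seats.take 9, 2 ≤ row.length) ∧ (∀ row ∈ passengers.take 9, 2 ≤ row.length) ∧
  ((List.range 9).map (fun i => (passengers.getD i []).getD 1 0)).sum ≤
    ((List.range 9).map (fun i => (seats.getD i []).getD 1 0)).sum

instance (seats : List (List Int)) (passengers : List (List Int)) :
    Decidable (Pre_getPlaneActual seats passengers) := by
  unfold Pre_getPlaneActual; infer_instance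

def pvWitness_getPlaneActual : List (List Int) × List (List Int) :=
  ([[1, 3], [2, 2]], [[1, 2], [2, 3]])

def Spec_getPlaneActual (seats : List (List Int)) (passengers : List (List Int))
    (out : List (List (List Int))) : Prop := out = getPlaneActual_alt seats passengers

instance (seats : List (List Int)) (passengers : List (List Int)) (out : List (List (List Int))) :
    Decidable (Spec_getPlaneActual seats passengers out) := by
  unfold Spec_getPlaneActual; infer_instance

-- ===== CLAIM (what is proved, stated in full; the proofs are below) =====
def Claim_equal_getPlaneActual : Prop := ∀ (seats : List (List Int)) (passengers : List (List Int)), Dom_getPlaneActual seats passengers → Pre_getPlaneActual seats passengers → Spec_getPlaneActual seats passengers (getPlaneActual seats passengers)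

-- ===== LEMMAS AND PROOFS =====

-- aligned reads: class count i of the 9-extended list = entry i of B's count list (any i ≥ 0)
theorem pv_read_eq (xs : List (List Int)) (i : Int) (hi : 0 ≤ i) :
    pvGet1 (listExtendA xs 9) i = PySem.List.pyGetD (bCounts xs) i 0 := by
  have hext : listExtendA xs 9 = (PySem.List.pyRange 0 9 1).map
      (fun i => match PySem.List.pyGet? xs i with | some row => row | none => [i + 1, 0]) := by
    unfold listExtendA
    simpa using PySem.List.foldl_append_singleton_eq_map
      (fun i => match PySem.List.pyGet? xs i with | some row => row | none => [i + 1, 0])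
      (PySem.List.pyRange 0 9 1) []
  by_cases h9 : i < 9
  · have hR : PySem.List.pyGetD (bCounts xs) i 0 =
        if i < (xs.length : Int) then pvGet1 xs i else 0 := by
      unfold bCounts
      exact PySem.List.pyGetD_map_pyRange_of_nonneg _ 9 i (0 : Int) hi h9
    have hL : pvGet1 (listExtendA xs 9) i = PySem.List.pyGetD
        (match PySem.List.pyGet? xs i with | some row => row | none => [i + 1, 0]) 1 0 := by
      rw [hext]
      unfold pvGet1
      rw [PySem.List.pyGetD_map_pyRange_of_nonneg _ 9 i ([] : List Int) hi h9]
    rw [hL, hR]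
    by_cases hl : i < (xs.length : Int)
    · have ht : i.toNat < xs.length := by omega
      have hg : PySem.List.pyGet? xs i = some xs[i.toNat] := by
        simp [PySem.List.pyGet?, PySem.List.pyIdx?, hi, hl]
      simp only [hg, hl, if_pos, pvGet1, PySem.List.pyGetD, Option.getD_some]
    · have hg : PySem.List.pyGet? xs i = none := by
        simp [PySem.List.pyGet?, PySem.List.pyIdx?, hi]
        omega
      simp only [hg, hl, if_neg, not_false_iff]
      simp [PySem.List.pyGetD, PySem.List.pyGet?, PySem.List.pyIdx?]
  · have hlen : (listExtendA xs 9).length = 9 := by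
      rw [hext]; simp [PySem.List.length_pyRange_one]
    have hlen2 : (bCounts xs).length = 9 := by
      unfold bCounts; simp [PySem.List.length_pyRange_one]
    have hg1 : PySem.List.pyGet? (listExtendA xs 9) i = none := by
      simp [PySem.List.pyGet?, PySem.List.pyIdx?, hi, hlen]; omega
    have hg2 : PySem.List.pyGet? (bCounts xs) i = none := by
      simp [PySem.List.pyGet?, PySem.List.pyIdx?, hi, hlen2]; omega
    unfold pvGet1
    rw [PySem.List.pyGetD_of_none _ _ _ hg1, PySem.List.pyGetD_of_none _ _ _ hg2]
    simp [PySem.List.pyGetD, PySem.List.pyGet?, PySem.List.pyIdx?]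

-- the downgrade phases agree step for step (sT/sc abstract, linked by the aligned-reads hypothesis)
theorem pv_down_bridge (sT : List (List Int)) (sc : List Int)
    (hs : ∀ i : Int, 0 ≤ i → pvGet1 sT i = PySem.List.pyGetD sc i 0) (f : Nat) :
    ∀ (a ud : List (List Int)) (g i : Int), 0 ≤ i →
    moveDownA f a sT g i ud = altDownLoop f sc a ud g i := by
  induction f with
  | zero => intro a ud g i _; rfl
  | succ f ih =>
    intro a ud g i hi
    simp only [moveDownA, altDownLoop, ← hs i hi]
    by_cases hg : g = 0
    · simp [hg]
    · simp only [hg, if_neg, not_false_iff]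
      exact ih _ _ _ _ (by omega)

-- one upgrade step of A's recursion = one altUpStep of B (established through the aligned reads)
theorem pv_step_eq (pT sT : List (List Int)) (pc sc : List Int)
    (hp : ∀ i : Int, 0 ≤ i → pvGet1 pT i = PySem.List.pyGetD pc i 0)
    (hs : ∀ i : Int, 0 ≤ i → pvGet1 sT i = PySem.List.pyGetD sc i 0)
    (f : Nat) (a ud : List (List Int)) (up : Int) (k : Int) (hk : 0 ≤ k) :
    moveUpA (f + 1) pT a k up sT ud =
      moveUpA f pT (altUpStep pc sc (a, ud, up) k).1 (k - 1)
        (altUpStep pc sc (a, ud, up) k).2.2 sT (altUpStep pc sc (a, ud, up) k).2.1 := by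
  simp only [moveUpA, altUpStep, ← hp k hk, ← hs k hk, if_neg (by omega : ¬ (k < 0))]
  by_cases hc : pvGet1 pT k + up < pvGet1 sT k <;> simp [hc]

-- the upgrade recursion of A = B's fold followed by B's finish
set_option maxHeartbeats 1600000 in
theorem pv_up_bridge (pT sT : List (List Int)) (pc sc : List Int)
    (hp : ∀ i : Int, 0 ≤ i → pvGet1 pT i = PySem.List.pyGetD pc i 0)
    (hs : ∀ i : Int, 0 ≤ i → pvGet1 sT i = PySem.List.pyGetD sc i 0) (k : Nat) :
    ∀ (a ud : List (List Int)) (up : Int),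
    moveUpA (k + 1) pT a ((k : Int) - 1) up sT ud =
      altFinish sc
        (((PySem.List.pyRange ((k : Int) - 1) (-1) (-1)).foldl
          (altUpStep pc sc) (a, ud, up))) := by
  induction k with
  | zero =>
    intro a ud up
    simp only [Nat.cast_zero, zero_sub]
    rw [PySem.List.pyRange_neg_one_eq_nil (by norm_num : (-1 : Int) ≤ -1)]
    simp only [moveUpA, List.foldl_nil, altFinish]
    by_cases hu : up = 0
    · simp [hu]
    · simp only [if_pos (by norm_num : (-1 : Int) < 0), ne_eq, hu,
        not_false_eq_true, if_true, if_false]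
      exact pv_down_bridge sT sc hs 10 a ud up 0 le_rfl
  | succ k ih =>
    intro a ud up
    rw [show ((k + 1 : Nat) : Int) - 1 = (k : Int) by push_cast; ring]
    rw [pv_step_eq pT sT pc sc hp hs (k + 1) a ud up (k : Int) (Int.natCast_nonneg k)]
    rw [ih _ _ _]
    rw [PySem.List.pyRange_neg_one_cons (by omega : (-1 : Int) < (k : Int)), List.foldl_cons]

-- rows written by pvSet1/pvSet0 keep length 2 when all rows have length 2
theorem pv_len2_set (xs : List (List Int)) (i j v : Int) (h : ∀ r ∈ xs, r.length = 2) :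
    ∀ r ∈ PySem.List.pySetD xs i (PySem.List.pySetD (PySem.List.pyGetD xs i []) j v),
      r.length = 2 := by
  intro r hr
  cases hk : PySem.List.pyIdx? xs.length i with
  | none =>
    rw [show PySem.List.pySetD xs i (PySem.List.pySetD (PySem.List.pyGetD xs i []) j v) = xs by
      simp [PySem.List.pySetD, PySem.List.pySet?, hk]] at hr
    exact h r hr
  | some k =>
    have hklen : k < xs.length := by
      simp only [PySem.List.pyIdx?] at hk
      split_ifs at hk <;> simp_all <;> omega
    have hrow : PySem.List.pyGetD xs i [] = xs[k] := by
      simp [PySem.List.pyGetD, PySem.List.pyGet?, hk, List.getElem?_eq_getElem hklen]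
    rw [show PySem.List.pySetD xs i (PySem.List.pySetD (PySem.List.pyGetD xs i []) j v) =
        xs.set k (PySem.List.pySetD (PySem.List.pyGetD xs i []) j v) by
      simp [PySem.List.pySetD, PySem.List.pySet?, hk]] at hr
    rcases List.mem_or_eq_of_mem_set hr with hmem | heq
    · exact h r hmem
    · rw [heq, PySem.List.length_pySetD, hrow]
      exact h _ (xs.getElem_mem hklen)

theorem pv_len2_altUpStep (pc sc : List Int) (st : List (List Int) × List (List Int) × Int)
    (k : Int) (h : ∀ r ∈ st.2.1, r.length = 2) :
    ∀ r ∈ (altUpStep pc sc st k).2.1, r.length = 2 := by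
  rcases st with ⟨a, ud, up⟩
  have key : ∀ (v : Int), ∀ r ∈ (if k ≠ 0 then pvSet0 ud (k - 1) v else pvSet1 ud 0 v),
      r.length = 2 := by
    intro v r hr
    split_ifs at hr
    · exact pv_len2_set ud (k - 1) 0 v h r (by simpa [pvSet0] using hr)
    · exact pv_len2_set ud 0 1 v h r (by simpa [pvSet1] using hr)
  intro r hr
  simp only [altUpStep] at hr
  by_cases hc : PySem.List.pyGetD pc k 0 + up < PySem.List.pyGetD sc k 0
  · rw [if_pos hc] at hr
    exact key _ r hr
  · rw [if_neg hc] at hr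
    exact key _ r hr

theorem pv_len2_fold (pc sc : List Int) (l : List Int) :
    ∀ (st : List (List Int) × List (List Int) × Int), (∀ r ∈ st.2.1, r.length = 2) →
    ∀ r ∈ (l.foldl (altUpStep pc sc) st).2.1, r.length = 2 := by
  induction l with
  | nil => intro st h; exact h
  | cons x l ih =>
    intro st h
    exact ih _ (pv_len2_altUpStep pc sc st x h)

theorem pv_len2_altDownLoop (f : Nat) (sc : List Int) :
    ∀ (a ud : List (List Int)) (g i : Int), (∀ r ∈ ud, r.length = 2) →
    ∀ r ∈ (altDownLoop f sc a ud g i).2, r.length = 2 := by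
  induction f with
  | zero => intro a ud g i h; exact h
  | succ f ih =>
    intro a ud g i h
    simp only [altDownLoop]
    by_cases hg : g = 0
    · simpa [hg] using h
    · simp only [hg, if_neg, not_false_iff]
      by_cases hi : i ≠ 1 <;>
        simp only [hi, ne_eq]
      · exact ih _ _ _ _ (pv_len2_set ud (i - 1) 1 _ h)
      · exact ih _ _ _ _ h

-- the two netting passes agree on two-entry rows
theorem pv_net_pair (u d : Int) : netA [u, d] = netB [u, d] := by
  simp only [netA, netB, PySem.List.pySetD, PySem.List.pySet?, PySem.List.pyGetD,
    PySem.List.pyGet?, PySem.List.pyIdx?]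
  norm_num
  split_ifs <;> simp_all <;> omega

theorem pv_net_map (l : List (List Int)) (h : ∀ r ∈ l, r.length = 2) :
    l.map netA = l.map netB := by
  induction l with
  | nil => rfl
  | cons r l ih =>
    have hr : r.length = 2 := h r List.mem_cons_self
    have ht : l.map netA = l.map netB := ih (fun r hm => h r (List.mem_cons_of_mem _ hm))
    rcases r with _ | ⟨u, r⟩
    · simp at hr
    rcases r with _ | ⟨d, r⟩
    · simp at hr
    rcases r with _ | ⟨e, r⟩
    · simp only [List.map_cons, ht, pv_net_pair u d]
    · simp at hr

set_option maxHeartbeats 2000000 in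
theorem pv_main (S P : List (List Int)) : getPlaneActual S P = getPlaneActual_alt S P := by
  have hA : (PySem.List.pyRange 0 9 1).foldl (fun a i => a ++ [[i + 1, 0]])
      ([] : List (List Int)) = (PySem.List.pyRange 0 9 1).map (fun i => [i + 1, 0]) := by
    simpa using PySem.List.foldl_append_singleton_eq_map (fun i => ([i + 1, 0] : List Int))
      (PySem.List.pyRange 0 9 1) []
  have hU : (PySem.List.pyRange 0 9 1).foldl (fun a _ => a ++ [[0, 0]])
      ([] : List (List Int)) = (PySem.List.pyRange 0 9 1).map (fun _ => ([0, 0] : List Int)) := by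
    simpa using PySem.List.foldl_append_singleton_eq_map (fun _ => ([0, 0] : List Int))
      (PySem.List.pyRange 0 9 1) []
  have h9 := pv_up_bridge (listExtendA P 9) (listExtendA S 9) (bCounts P) (bCounts S)
    (fun i hi => pv_read_eq P i hi) (fun i hi => pv_read_eq S i hi) 9
    ((PySem.List.pyRange 0 9 1).map (fun i => [i + 1, 0]))
    ((PySem.List.pyRange 0 9 1).map (fun _ => ([0, 0] : List Int))) 0
  rw [show ((9 : Nat) : Int) - 1 = (8 : Int) by norm_num] at h9
  rcases hst : (PySem.List.pyRange 8 (-1) (-1)).foldl (altUpStep (bCounts P) (bCounts S))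
      ((PySem.List.pyRange 0 9 1).map (fun i => [i + 1, 0]),
       (PySem.List.pyRange 0 9 1).map (fun _ => ([0, 0] : List Int)), 0) with ⟨A1, UD1, G1⟩
  have hfold := pv_len2_fold (bCounts P) (bCounts S) (PySem.List.pyRange 8 (-1) (-1))
    ((PySem.List.pyRange 0 9 1).map (fun i => [i + 1, 0]),
     (PySem.List.pyRange 0 9 1).map (fun _ => ([0, 0] : List Int)), 0) (by decide)
  rw [hst] at hfold
  have hrows : ∀ r ∈ (altFinish (bCounts S) (A1, UD1, G1)).2, r.length = 2 := by
    unfold altFinish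
    split_ifs
    · exact pv_len2_altDownLoop 10 (bCounts S) A1 UD1 G1 0 hfold
    · exact hfold
  rw [hst] at h9
  simp only [getPlaneActual, getPlaneActual_alt, hA, hU, hst, h9]
  rw [PySem.List.slice_zero_start, PySem.List.slice_to_natCast]
  simp only [List.cons.injEq, and_true, true_and]
  exact pv_net_map _ hrows

-- ===== VERDICT (by name: the statement is the Claim_ definition above) =====
theorem getPlaneActual_spec : Claim_equal_getPlaneActual := by
  intro seats passengers _ _
  unfold Spec_getPlaneActual
  exact pv_main seats passengers
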